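-- pv_equiv track=rewrite | github.com/mallikarjunimmadi/repo | misc/ping-report_v0.py | get_named_subdirectory
-- ===== SOURCE A (Python) =====
-- from typing import Dict, Tuple, Iterable, Optional, Union, Iterator
--
-- def get_named_subdirectory(parts: Iterable[str], marker_dir: str) -> Optional[str]:
--     """Return the directory name immediately above marker_dir (case-insensitive)."""
--     parts = list(parts)
--     lower_parts = [p.lower() for p in parts]
--     marker = marker_dir.lower()
--     if marker in lower_parts:
--         idx = lower_parts.index(marker)
--         if idx > 0:
--             return parts[idx - 1]
--     return None
-- ===== SOURCE B (Python) =====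
-- def get_named_subdirectory(parts, marker_dir):
--     """Return the directory name immediately above marker_dir (case-insensitive)."""
--     marker = marker_dir.lower()
--     prev = None
--     for p in parts:
--         if p.lower() == marker:
--             return prev
--         prev = p
--     return None
-- ===== Notes on version B (the rewrite author's own statement) =====
-- stated objective: simpler
-- what changed: One traversal keeping the previous element: return it at the first case-insensitive match, instead of building a lowercased copy, testing membership, and re-scanning with .index to index back into the original list.
import Mathlib
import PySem

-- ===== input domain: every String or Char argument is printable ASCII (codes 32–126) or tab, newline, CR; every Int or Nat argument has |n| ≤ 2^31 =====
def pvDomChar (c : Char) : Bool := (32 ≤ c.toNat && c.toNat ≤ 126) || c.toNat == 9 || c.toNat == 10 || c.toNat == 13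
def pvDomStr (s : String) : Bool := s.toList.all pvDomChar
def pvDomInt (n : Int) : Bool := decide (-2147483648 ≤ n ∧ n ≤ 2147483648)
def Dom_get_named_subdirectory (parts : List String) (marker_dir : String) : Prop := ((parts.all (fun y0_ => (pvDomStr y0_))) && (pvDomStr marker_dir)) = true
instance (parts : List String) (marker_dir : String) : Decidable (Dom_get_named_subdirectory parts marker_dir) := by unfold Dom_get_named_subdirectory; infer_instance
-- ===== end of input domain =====

-- B replaces A's three passes (lowercase map, membership test, .index re-scan) by one
-- traversal that keeps the previous element and returns it at the first match (objective: simpler).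

-- ===== PORT A =====
def get_named_subdirectory (parts : List String) (marker_dir : String) : Option String :=
  if PySem.Str.lower marker_dir ∈ parts.map PySem.Str.lower then
    match PySem.List.index? (parts.map PySem.Str.lower) (PySem.Str.lower marker_dir) with
    | some idx => if 0 < idx then PySem.List.pyGet? parts ((idx : Int) - 1) else none
    | none => none
  else none

-- ===== PORT B =====
def gnsLoop (marker : String) (prev : Option String) : List String → Option String
  | [] => none
  | p :: rest => if PySem.Str.lower p = marker then prev else gnsLoop marker (some p) rest

def get_named_subdirectory_alt (parts : List String) (marker_dir : String) : Option String :=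
  gnsLoop (PySem.Str.lower marker_dir) none parts

-- ===== PRECONDITION & SPEC =====
def Spec_get_named_subdirectory (parts : List String) (marker_dir : String) (out : Option String) : Prop := out = get_named_subdirectory_alt parts marker_dir
instance (parts : List String) (marker_dir : String) (out : Option String) : Decidable (Spec_get_named_subdirectory parts marker_dir out) := by unfold Spec_get_named_subdirectory; infer_instance

-- ===== CLAIM (what is proved, stated in full; the proofs are below) =====
def Claim_equal_get_named_subdirectory : Prop := ∀ (parts : List String) (marker_dir : String), Dom_get_named_subdirectory parts marker_dir → Spec_get_named_subdirectory parts marker_dir (get_named_subdirectory parts marker_dir)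

-- ===== LEMMAS AND PROOFS =====

-- B's loop, characterised by the position of the first match in the lowered list.
theorem gnsLoop_eq (marker : String) : ∀ (rest : List String) (prev : Option String),
    gnsLoop marker prev rest =
      match PySem.List.index? (rest.map PySem.Str.lower) marker with
      | none => none
      | some 0 => prev
      | some (j+1) => rest[j]?
  | [], prev => by simp [gnsLoop, PySem.List.index?]
  | p :: rest, prev => by
    by_cases h : PySem.Str.lower p = marker
    · rw [show (p :: rest).map PySem.Str.lower = marker :: rest.map PySem.Str.lower by simp [h],
          PySem.List.index?_cons_self]
      simp [gnsLoop, h]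
    · rw [show gnsLoop marker prev (p :: rest) = gnsLoop marker (some p) rest by
        simp [gnsLoop, h]]
      rw [gnsLoop_eq marker rest (some p)]
      rw [show PySem.List.index? ((p :: rest).map PySem.Str.lower) marker
            = (PySem.List.index? (rest.map PySem.Str.lower) marker).map (· + 1) by
        simpa using PySem.List.index?_cons_of_ne (x := PySem.Str.lower p)
          (xs := rest.map PySem.Str.lower) (v := marker) h]
      cases hidx : PySem.List.index? (rest.map PySem.Str.lower) marker with
      | none => simp
      | some j => cases j with
        | zero => simp
        | succ j' => simp

theorem get_named_subdirectory_spec : Claim_equal_get_named_subdirectory := by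
  intro parts marker_dir _
  unfold Spec_get_named_subdirectory get_named_subdirectory get_named_subdirectory_alt
  rw [gnsLoop_eq]
  cases hidx : PySem.List.index? (parts.map PySem.Str.lower) (PySem.Str.lower marker_dir) with
  | none =>
    have hmem : PySem.Str.lower marker_dir ∉ parts.map PySem.Str.lower :=
      (PySem.List.index?_eq_none_iff _ _).mp hidx
    simp [hmem]
  | some idx =>
    have hmem : PySem.Str.lower marker_dir ∈ parts.map PySem.Str.lower := by
      rw [← PySem.List.index?_isSome_iff, hidx]; rfl
    cases idx with
    | zero => simp [hmem]
    | succ j =>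
      simp [hmem, PySem.List.pyGet?_natCast]
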